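-- pv_equiv track=rewrite | github.com/NickLiJunjie/img2kpf | img2kpf/gui/i18n.py | _ordered_languages
-- ===== SOURCE A (Python) =====
-- def _normalize_token(value: str) -> str:
--     return value.strip().lower().replace("_", "-")
--
-- def _ordered_languages(candidates: list[str]) -> tuple[str, ...]:
--     normalized = {_normalize_token(language) for language in candidates if isinstance(language, str)}
--     normalized.discard("")
--     if not normalized:
--         return ()
--     preferred = [language for language in ("zh", "en") if language in normalized]
--     trailing = sorted(language for language in normalized if language not in {"zh", "en"})
--     return tuple(preferred + trailing)
-- ===== SOURCE B (Python) =====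
-- def _normalize_token(value: str) -> str:
--     return value.strip().lower().replace("_", "-")
--
-- _PRIORITY = {"zh": 0, "en": 1}
--
-- def _ordered_languages(candidates):
--     normalized = {_normalize_token(language) for language in candidates if isinstance(language, str)}
--     normalized.discard("")
--     return tuple(sorted(normalized, key=lambda language: (_PRIORITY.get(language, 2), language)))
-- ===== Notes on version B (the rewrite author's own statement) =====
-- stated objective: idiomatic
-- what changed: Replaces the empty-check, the preferred-list partition filter, the separate sort of the trailing languages and the concatenation with a single keyed sort whose (priority, language) key encodes zh-first, en-second, rest-alphabetical.
import Mathlib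
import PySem

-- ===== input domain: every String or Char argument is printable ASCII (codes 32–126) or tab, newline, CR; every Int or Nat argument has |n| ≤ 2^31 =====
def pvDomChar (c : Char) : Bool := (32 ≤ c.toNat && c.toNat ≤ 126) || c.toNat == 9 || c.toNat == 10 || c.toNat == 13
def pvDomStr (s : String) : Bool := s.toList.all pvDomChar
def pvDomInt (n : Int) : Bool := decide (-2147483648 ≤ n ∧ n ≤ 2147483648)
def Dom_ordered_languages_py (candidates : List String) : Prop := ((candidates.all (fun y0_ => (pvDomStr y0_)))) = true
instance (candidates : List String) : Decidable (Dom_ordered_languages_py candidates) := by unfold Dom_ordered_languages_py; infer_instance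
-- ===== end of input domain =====

-- B replaces A's empty-check + preferred/trailing partition + concatenation by a single
-- keyed sort with a (priority, language) key; return values are proved equal on all inputs.


-- ===== PORT A =====
-- shared module helper _normalize_token (identical in A's module and in Source B)
def normalize_token (value : String) : String :=
  PySem.Str.replace (PySem.Str.lower (PySem.Str.strip value)) "_" "-"

def ordered_languages_py (candidates : List String) : List String :=
  let normalized := PySem.Set.ofList (candidates.map (fun language => normalize_token language))
  let normalized := PySem.Set.discard normalized ""
  if normalized.isEmpty then []
  else
    let preferred := (["zh", "en"]).filter (fun language => PySem.Set.contains normalized language)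
    let trailing := PySem.List.sorted
      (normalized.filter (fun language => !(PySem.Set.contains (PySem.Set.ofList ["zh", "en"]) language)))
      (fun l => l)
    preferred ++ trailing

-- ===== PORT B =====
-- _PRIORITY.get(language, 2)
def lang_priority (language : String) : Int :=
  PySem.Dict.getD (PySem.Dict.mk [("zh", (0 : Int)), ("en", 1)]) language 2

def ordered_languages_py_alt (candidates : List String) : List String :=
  let normalized := PySem.Set.discard
    (PySem.Set.ofList (candidates.map (fun language => normalize_token language))) ""
  PySem.List.sorted2 normalized (fun language => lang_priority language) (fun language => language)

-- ===== PRECONDITION & SPEC =====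
def Spec_ordered_languages_py (candidates : List String) (out : List String) : Prop := out = ordered_languages_py_alt candidates
instance (candidates : List String) (out : List String) : Decidable (Spec_ordered_languages_py candidates out) := by unfold Spec_ordered_languages_py; infer_instance

-- ===== CLAIM (what is proved, stated in full; the proofs are below) =====
def Claim_equal_ordered_languages_py : Prop := ∀ (candidates : List String), Dom_ordered_languages_py candidates → Spec_ordered_languages_py candidates (ordered_languages_py candidates)

-- ===== LEMMAS AND PROOFS =====

-- the strict "before" comparison used by sorted2 with keys (lang_priority, id)
def langBefore (a b : String) : Bool :=
  decide (lang_priority a < lang_priority b) ||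
    (!decide (lang_priority b < lang_priority a) && decide (a < b))

lemma langBefore_false_iff (a b : String) : langBefore a b = false ↔
    ¬ lang_priority a < lang_priority b ∧ (lang_priority b < lang_priority a ∨ ¬ a < b) := by
  simp [langBefore]
  intro h1
  by_cases h2 : lang_priority a ≤ lang_priority b <;> simp_all

lemma langBefore_true_iff (a b : String) : langBefore a b = true ↔
    lang_priority a < lang_priority b ∨ (¬ lang_priority b < lang_priority a ∧ a < b) := by
  simp [langBefore]

lemma langBefore_asymm {a b : String} (h : langBefore a b = true) : langBefore b a = false := by
  rw [langBefore_true_iff] at h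
  rw [langBefore_false_iff]
  rcases h with h | ⟨h1, h2⟩
  · exact ⟨lt_asymm h, Or.inl h⟩
  · exact ⟨h1, Or.inr (lt_asymm h2)⟩

lemma langBefore_antisymm {a b : String} (hab : langBefore a b = false)
    (hba : langBefore b a = false) : a = b := by
  rw [langBefore_false_iff] at hab hba
  rcases hab with ⟨h1, h2⟩; rcases hba with ⟨h3, h4⟩
  rcases h2 with h2 | h2
  · exact absurd h2 h3
  rcases h4 with h4 | h4
  · exact absurd h4 h1
  exact le_antisymm (not_lt.mp h4) (not_lt.mp h2)

lemma langBefore_not_trans {a b c : String} (hab : langBefore a b = false)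
    (hbc : langBefore b c = false) : langBefore a c = false := by
  rw [langBefore_false_iff] at hab hbc ⊢
  rcases hab with ⟨h1, h2⟩; rcases hbc with ⟨h3, h4⟩
  refine ⟨by omega, ?_⟩
  by_cases h5 : lang_priority c < lang_priority a
  · exact Or.inl h5
  rcases h2 with h2 | h2
  · exact absurd (by omega : lang_priority b < lang_priority a) (by omega)
  rcases h4 with h4 | h4
  · omega
  · exact Or.inr (fun hac => h2 (lt_of_lt_of_le hac (not_lt.mp h4)))

-- langLE a b = "a may precede b in the keyed-sort output"
def langLE (a b : String) : Prop := langBefore b a = false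

lemma insertBy_langBefore_pairwise (x : String) (ys : List String)
    (h : ys.Pairwise langLE) :
    (PySem.List.insertBy langBefore x ys).Pairwise langLE := by
  induction ys with
  | nil => simp [PySem.List.insertBy, langLE]
  | cons y ys ih =>
    rcases List.pairwise_cons.mp h with ⟨hy, hys⟩
    by_cases hxy : langBefore x y = true
    · have he : PySem.List.insertBy langBefore x (y :: ys) = x :: y :: ys := by
        simp [PySem.List.insertBy, hxy]
      rw [he]
      refine List.pairwise_cons.mpr ⟨?_, h⟩
      intro z hz
      rcases List.mem_cons.mp hz with rfl | hz
      · exact langBefore_asymm hxy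
      · exact langBefore_not_trans (hy z hz) (langBefore_asymm hxy)
    · have he : PySem.List.insertBy langBefore x (y :: ys) =
          y :: PySem.List.insertBy langBefore x ys := by
        simp [PySem.List.insertBy, hxy]
      rw [he]
      refine List.pairwise_cons.mpr ⟨?_, ih hys⟩
      intro z hz
      rcases (PySem.List.mem_insertBy langBefore x z ys).mp hz with rfl | hz
      · simpa [langLE] using hxy
      · exact hy z hz

lemma foldl_insertBy_pairwise (xs : List String) (acc : List String)
    (h : acc.Pairwise langLE) :
    (xs.foldl (fun acc x => PySem.List.insertBy langBefore x acc) acc).Pairwise langLE := by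
  induction xs generalizing acc with
  | nil => simpa
  | cons x xs ih => exact ih _ (insertBy_langBefore_pairwise x acc h)

lemma sorted2_lang_pairwise (xs : List String) :
    (PySem.List.sorted2 xs (fun l => lang_priority l) (fun l => l)).Pairwise langLE := by
  have he : PySem.List.sorted2 xs (fun l => lang_priority l) (fun l => l) =
      xs.foldl (fun acc x => PySem.List.insertBy langBefore x acc) [] := rfl
  rw [he]
  exact foldl_insertBy_pairwise xs [] (by simp)

lemma lang_priority_other {l : String} (h1 : l ≠ "zh") (h2 : l ≠ "en") :
    lang_priority l = 2 := by
  simp [lang_priority, PySem.Dict.getD, PySem.Dict.get?, List.find?,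
    show ("zh" == l) = false from beq_eq_false_iff_ne.mpr (Ne.symm h1),
    show ("en" == l) = false from beq_eq_false_iff_ne.mpr (Ne.symm h2)]

-- A's branch output: abbreviate the two pieces
lemma mem_trailing_iff (s : List String) (z : String) :
    z ∈ PySem.List.sorted
        (s.filter (fun language => !(PySem.Set.contains (PySem.Set.ofList ["zh", "en"]) language)))
        (fun l => l) ↔ z ∈ s ∧ z ≠ "zh" ∧ z ≠ "en" := by
  rw [PySem.List.mem_sorted]
  simp [PySem.Set.contains, List.mem_filter]

lemma trailing_prio (s : List String) {z : String}
    (hz : z ∈ PySem.List.sorted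
        (s.filter (fun language => !(PySem.Set.contains (PySem.Set.ofList ["zh", "en"]) language)))
        (fun l => l)) : lang_priority z = 2 := by
  rcases (mem_trailing_iff s z).mp hz with ⟨_, h1, h2⟩
  exact lang_priority_other h1 h2

lemma mem_preferred_iff (s : List String) (z : String) :
    z ∈ (["zh", "en"]).filter (fun language => PySem.Set.contains s language) ↔
      (z = "zh" ∨ z = "en") ∧ z ∈ s := by
  simp [PySem.Set.contains, List.mem_filter]

lemma a_output_pairwise (s : List String) :
    ((["zh", "en"]).filter (fun language => PySem.Set.contains s language) ++
      PySem.List.sorted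
        (s.filter (fun language => !(PySem.Set.contains (PySem.Set.ofList ["zh", "en"]) language)))
        (fun l => l)).Pairwise langLE := by
  rw [List.pairwise_append]
  refine ⟨?_, ?_, ?_⟩
  · -- inside preferred: the only possible pair is ("zh", "en")
    have hsub : List.Sublist ((["zh", "en"]).filter (fun language => PySem.Set.contains s language)) ["zh", "en"] :=
      List.filter_sublist
    exact List.Pairwise.sublist hsub
      (by simp [langLE]; decide)
  · -- inside trailing: sorted by identity
    have hp := PySem.List.sorted_pairwise
      (s.filter (fun language => !(PySem.Set.contains (PySem.Set.ofList ["zh", "en"]) language)))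
      (fun l => l)
    refine List.Pairwise.imp_of_mem ?_ hp
    intro a b ha hb hab
    have hpa := trailing_prio s ha
    have hpb := trailing_prio s hb
    rw [langLE, langBefore_false_iff, hpa, hpb]
    exact ⟨by omega, Or.inr (not_lt.mpr hab)⟩
  · -- across: preferred has priority ≤ 1, trailing has priority 2
    intro a ha b hb
    rcases (mem_preferred_iff s a).mp ha with ⟨hcase, _⟩
    have hpa : lang_priority a = 0 ∨ lang_priority a = 1 := by
      rcases hcase with rfl | rfl
      · left; decide
      · right; decide
    have hpb := trailing_prio s hb
    rw [langLE, langBefore_false_iff, hpb]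
    constructor
    · omega
    · left; omega

lemma a_output_perm (s : List String) (hnd : s.Nodup) :
    ((["zh", "en"]).filter (fun language => PySem.Set.contains s language) ++
      PySem.List.sorted
        (s.filter (fun language => !(PySem.Set.contains (PySem.Set.ofList ["zh", "en"]) language)))
        (fun l => l)).Perm s := by
  have hperm := List.filter_append_perm
    (fun language => PySem.Set.contains (PySem.Set.ofList ["zh", "en"]) language) s
  refine List.Perm.trans (List.Perm.append ?_ (PySem.List.sorted_perm _ _ _)) hperm
  -- preferred ~ s.filter (· ∈ {"zh","en"}) : both nodup with the same members
  rw [List.perm_ext_iff_of_nodup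
    (List.Nodup.filter _ (by decide)) (List.Nodup.filter _ hnd)]
  intro z
  rw [mem_preferred_iff]
  simp [PySem.Set.contains, List.mem_filter]
  tauto

lemma a_output_eq_sorted2 (s : List String) (hnd : s.Nodup) :
    ((["zh", "en"]).filter (fun language => PySem.Set.contains s language) ++
      PySem.List.sorted
        (s.filter (fun language => !(PySem.Set.contains (PySem.Set.ofList ["zh", "en"]) language)))
        (fun l => l)) =
      PySem.List.sorted2 s (fun language => lang_priority language) (fun language => language) := by
  refine List.Perm.eq_of_pairwise (le := langLE)
    ?_ (a_output_pairwise s) (sorted2_lang_pairwise s)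
    ((a_output_perm s hnd).trans ((PySem.List.sorted2_perm s _ _ false).symm))
  intro a b _ _ h1 h2
  unfold langLE at h1 h2
  exact langBefore_antisymm h2 h1

lemma main_eq (s : List String) (hnd : s.Nodup) :
    (if s.isEmpty then []
      else (["zh", "en"]).filter (fun language => PySem.Set.contains s language) ++
        PySem.List.sorted
          (s.filter (fun language => !(PySem.Set.contains (PySem.Set.ofList ["zh", "en"]) language)))
          (fun l => l)) =
    PySem.List.sorted2 s (fun language => lang_priority language) (fun language => language) := by
  by_cases hs : s.isEmpty
  · rw [if_pos hs]
    rw [List.isEmpty_iff] at hs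
    subst hs
    rfl
  · rw [if_neg hs]
    exact a_output_eq_sorted2 s hnd

-- ===== VERDICT (by name: the statement is the Claim_ definition above) =====
theorem ordered_languages_py_spec : Claim_equal_ordered_languages_py := by
  intro candidates _
  unfold Spec_ordered_languages_py ordered_languages_py ordered_languages_py_alt
  exact main_eq _ (List.Nodup.filter _ (PySem.Set.nodup_ofList _))
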